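-- pv_equiv track=rewrite | github.com/haha523/algorithms-and-data-structures | lab4/task 9/tests/test 9.py | process_queue
-- ===== SOURCE A (Python) =====
-- from collections import deque
--
-- def process_queue(commands):
--     queue = deque()
--     output = []
--
--     for command in commands:
--         action = command[0]
--         if action == '+':
--             patient_id = command[1]
--             queue.append(patient_id)
--         elif action == '*':
--             patient_id = command[1]
--             mid_index = len(queue) // 2
--             if len(queue) % 2 == 0:
--                 mid_index -= 1
--             queue.insert(mid_index + 1, patient_id)
--         elif action == '-':
--             output.append(queue.popleft())
--
--     return output
-- ===== SOURCE B (Python) =====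
-- from collections import deque
--
-- def process_queue(commands):
--     # Two deques: `front` holds the first ceil(n/2) patients, `back` the rest,
--     # so a middle insertion is an O(1) appendleft on `back`.
--     front = deque()
--     back = deque()
--     output = []
--     for command in commands:
--         action = command[0]
--         if action == '+':
--             back.append(command[1])
--         elif action == '*':
--             back.appendleft(command[1])
--         elif action == '-':
--             output.append(front.popleft())
--         else:
--             continue
--         # restore the invariant len(front) == ceil((len(front)+len(back))/2)
--         while len(front) < (len(front) + len(back) + 1) // 2:
--             front.append(back.popleft())
--     return output
-- ===== Notes on version B (the rewrite author's own statement) =====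
-- stated objective: alternative
-- what changed: B replaces A's single deque with middle insertion via deque.insert by two balanced deques whose boundary is the insertion point, so inserts and pops touch only the deque ends.
import Mathlib
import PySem

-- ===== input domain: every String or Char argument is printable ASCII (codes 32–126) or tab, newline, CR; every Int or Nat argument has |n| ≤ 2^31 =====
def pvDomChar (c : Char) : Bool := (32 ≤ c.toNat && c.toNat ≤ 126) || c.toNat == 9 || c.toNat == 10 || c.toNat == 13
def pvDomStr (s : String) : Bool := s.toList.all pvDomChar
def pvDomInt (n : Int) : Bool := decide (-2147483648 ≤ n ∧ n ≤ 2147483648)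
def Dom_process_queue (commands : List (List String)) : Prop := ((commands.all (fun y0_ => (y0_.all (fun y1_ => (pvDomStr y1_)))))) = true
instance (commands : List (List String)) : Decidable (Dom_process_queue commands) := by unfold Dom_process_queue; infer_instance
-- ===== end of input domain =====

-- B keeps the queue as two balanced deques with the middle at the boundary, replacing A's single deque with deque.insert at the middle.

-- ===== PORT A =====
def pvInsertMid (queue : List String) (patient_id : String) : List String :=
  let mid0 : Int := PySem.Int.floordiv (queue.length : Int) 2
  let mid : Int := if PySem.Int.mod (queue.length : Int) 2 = 0 then mid0 - 1 else mid0
  PySem.List.insert queue (mid + 1) patient_id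

def pvStepA (st : List String × List String) (command : List String) : List String × List String :=
  match PySem.List.pyGet? command 0 with
  | none => st        -- command[0] raises IndexError: excluded by Pre_
  | some action =>
    if action = "+" then
      match PySem.List.pyGet? command 1 with
      | none => st    -- command[1] raises IndexError: excluded by Pre_
      | some patient_id => (st.1 ++ [patient_id], st.2)
    else if action = "*" then
      match PySem.List.pyGet? command 1 with
      | none => st    -- command[1] raises IndexError: excluded by Pre_
      | some patient_id => (pvInsertMid st.1 patient_id, st.2)
    else if action = "-" then
      match st.1 with
      | [] => st      -- queue.popleft() raises IndexError: excluded by Pre_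
      | h :: t => (t, st.2 ++ [h])
    else st

def process_queue (commands : List (List String)) : List String :=
  (commands.foldl pvStepA ([], [])).2

-- ===== PORT B =====
-- the Python while-loop `while len(front) < (len(front)+len(back)+1)//2: front.append(back.popleft())`
def pvRebal (front back : List String) : List String × List String :=
  if front.length < (front.length + back.length + 1) / 2 then
    match back with
    | [] => (front, [])               -- unreachable: the guard forces back ≠ []
    | b :: bs => pvRebal (front ++ [b]) bs
  else (front, back)
termination_by back.length
decreasing_by simp_all

def pvStepB (st : List String × List String × List String) (command : List String) :
    List String × List String × List String :=
  match PySem.List.pyGet? command 0 with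
  | none => st
  | some action =>
    if action = "+" then
      match PySem.List.pyGet? command 1 with
      | none => st
      | some pid =>
        let fb := pvRebal st.1 (st.2.1 ++ [pid])
        (fb.1, fb.2, st.2.2)
    else if action = "*" then
      match PySem.List.pyGet? command 1 with
      | none => st
      | some pid =>
        let fb := pvRebal st.1 (pid :: st.2.1)
        (fb.1, fb.2, st.2.2)
    else if action = "-" then
      match st.1 with
      | [] => st
      | h :: t =>
        let fb := pvRebal t st.2.1
        (fb.1, fb.2, st.2.2 ++ [h])
    else st

def process_queue_alt (commands : List (List String)) : List String :=
  (commands.foldl pvStepB ([], [], [])).2.2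

-- ===== PRECONDITION & SPEC =====
def pvIsM (c : List String) : Bool := c.head? == some "-"
def pvIsP (c : List String) : Bool := (c.head? == some "+") || (c.head? == some "*")

-- Pre_ excludes exactly the inputs on which the Python raises IndexError: an empty
-- command (command[0]), a '+'/'*' command without a patient id (command[1]), and a
-- prefix with more '-' commands than prior '+'/'*' commands (popleft on an empty queue).
def Pre_process_queue (commands : List (List String)) : Prop :=
  (∀ c ∈ commands, c ≠ [] ∧ ((c.head? = some "+" ∨ c.head? = some "*") → 2 ≤ c.length)) ∧
  (∀ n ∈ List.range (commands.length + 1),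
    (commands.take n).countP pvIsM ≤ (commands.take n).countP pvIsP)

instance (commands : List (List String)) : Decidable (Pre_process_queue commands) := by
  unfold Pre_process_queue; infer_instance

def pvWitness_process_queue : List (List String) := [["+", "1"], ["*", "2"], ["-"], ["-"]]

def Spec_process_queue (commands : List (List String)) (out : List String) : Prop := out = process_queue_alt commands
instance (commands : List (List String)) (out : List String) : Decidable (Spec_process_queue commands out) := by unfold Spec_process_queue; infer_instance

-- ===== CLAIM (what is proved, stated in full; the proofs are below) =====
def Claim_equal_process_queue : Prop := ∀ (commands : List (List String)), Dom_process_queue commands → Pre_process_queue commands → Spec_process_queue commands (process_queue commands)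

-- ===== LEMMAS AND PROOFS =====
lemma pvRebal_noop (front back : List String) (h : back.length ≤ front.length) :
    pvRebal front back = (front, back) := by
  rw [pvRebal.eq_def]
  rw [if_neg (by omega)]

lemma pvRebal_one (front bs : List String) (b : String) (h : bs.length = front.length) :
    pvRebal front (b :: bs) = (front ++ [b], bs) := by
  rw [pvRebal.eq_def]
  rw [if_pos (by simp only [List.length_cons]; omega)]
  exact pvRebal_noop _ _ (by simp only [List.length_append, List.length_cons]; omega)

lemma pvRebal_spec (front back : List String)
    (h1 : front.length ≤ back.length + 1) (h2 : back.length ≤ front.length + 1) :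
    ∃ f' b', pvRebal front back = (f', b') ∧ f' ++ b' = front ++ back ∧
      f'.length + b'.length = front.length + back.length ∧
      (2 * f'.length = front.length + back.length ∨
       2 * f'.length = front.length + back.length + 1) := by
  by_cases hb : back.length ≤ front.length
  · exact ⟨front, back, pvRebal_noop front back hb, rfl, rfl, by omega⟩
  · have hbe : back.length = front.length + 1 := by omega
    rcases back with _ | ⟨b0, bs⟩
    · simp at hbe
    · have hbs : bs.length = front.length := by simpa using hbe
      exact ⟨front ++ [b0], bs, pvRebal_one front bs b0 hbs, by simp,
        by simp; omega, by simp; omega⟩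

lemma insertA_eq (front back : List String) (p : String)
    (hinv : 2 * front.length = front.length + back.length ∨
            2 * front.length = front.length + back.length + 1) :
    pvInsertMid (front ++ back) p = front ++ p :: back := by
  unfold pvInsertMid
  have hlen : (front ++ back).length = front.length + back.length := by simp
  show PySem.List.insert (front ++ back)
      ((if PySem.Int.mod ((front ++ back).length : Int) 2 = 0
        then PySem.Int.floordiv ((front ++ back).length : Int) 2 - 1
        else PySem.Int.floordiv ((front ++ back).length : Int) 2) + 1) p = front ++ p :: back
  rw [PySem.Int.mod_eq_emod_of_pos (by norm_num),
      PySem.Int.floordiv_eq_ediv_of_pos (by norm_num)]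
  rcases hinv with h | h
  · rw [if_pos (by omega : (((front ++ back).length : Int)) % 2 = 0)]
    have hpos : ((front ++ back).length : Int) / 2 - 1 + 1 = (front.length : Int) := by omega
    rw [hpos, PySem.List.insert_natCast _ _ _ (by omega), List.take_left, List.drop_left]
  · rw [if_neg (by omega : ¬ (((front ++ back).length : Int)) % 2 = 0)]
    have hpos : ((front ++ back).length : Int) / 2 + 1 = (front.length : Int) := by omega
    rw [hpos, PySem.List.insert_natCast _ _ _ (by omega), List.take_left, List.drop_left]

lemma loop_eq : ∀ (cmds : List (List String)) (front back out : List String),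
    (∀ c ∈ cmds, c ≠ [] ∧ ((c.head? = some "+" ∨ c.head? = some "*") → 2 ≤ c.length)) →
    (∀ n : Nat, (cmds.take n).countP pvIsM ≤ front.length + back.length + (cmds.take n).countP pvIsP) →
    (2 * front.length = front.length + back.length ∨
     2 * front.length = front.length + back.length + 1) →
    List.foldl pvStepA (front ++ back, out) cmds =
      ((List.foldl pvStepB (front, back, out) cmds).1 ++
         (List.foldl pvStepB (front, back, out) cmds).2.1,
       (List.foldl pvStepB (front, back, out) cmds).2.2)
  | [], front, back, out, _, _, _ => by simp
  | c :: cs, front, back, out, hwf, hbal, hinv => by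
    have hc := hwf c (by simp)
    have hwf' : ∀ x ∈ cs, x ≠ [] ∧ ((x.head? = some "+" ∨ x.head? = some "*") → 2 ≤ x.length) :=
      fun x hx => hwf x (by simp [hx])
    rcases c with _ | ⟨a, rest⟩
    · exact absurd rfl hc.1
    have hg0 : PySem.List.pyGet? (a :: rest) 0 = some a := by simp [pysem]
    simp only [List.foldl_cons]
    by_cases hp : a = "+"
    · subst hp
      rcases rest with _ | ⟨p, rest2⟩
      · have := hc.2 (by simp); simp at this
      have hg1 : PySem.List.pyGet? ("+" :: p :: rest2 : List String) 1 = some p := by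
        rw [show (1 : Int) = ((1 : Nat) : Int) by norm_num, PySem.List.pyGet?_natCast]; rfl
      obtain ⟨f', b', hre, hcat, hlen', hinv'⟩ :=
        pvRebal_spec front (back ++ [p]) (by simp; omega) (by simp; omega)
      have hlen'' : f'.length + b'.length = front.length + back.length + 1 := by
        simpa using hlen'
      have eA : pvStepA (front ++ back, out) ("+" :: p :: rest2) = (f' ++ b', out) := by
        simp [pvStepA, hg0, hcat]
      have eB : pvStepB (front, back, out) ("+" :: p :: rest2) = (f', b', out) := by
        simp [pvStepB, hg0, hre]
      rw [eA, eB]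
      exact loop_eq cs f' b' out hwf'
        (fun n => by
          have h := hbal (n + 1)
          simp only [List.take_succ_cons, List.countP_cons] at h
          have hm : pvIsM ("+" :: p :: rest2) = false := rfl
          have hq : pvIsP ("+" :: p :: rest2) = true := rfl
          rw [hm, hq] at h
          simp at h
          omega)
        (by have h1 := hinv'; have h2 := hlen''; simp only [List.length_append, List.length_cons, List.length_nil] at h1; omega)
    by_cases hs : a = "*"
    · subst hs
      rcases rest with _ | ⟨p, rest2⟩
      · have := hc.2 (by simp); simp at this
      have hg1 : PySem.List.pyGet? ("*" :: p :: rest2 : List String) 1 = some p := by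
        rw [show (1 : Int) = ((1 : Nat) : Int) by norm_num, PySem.List.pyGet?_natCast]; rfl
      obtain ⟨f', b', hre, hcat, hlen', hinv'⟩ :=
        pvRebal_spec front (p :: back) (by simp; omega) (by simp; omega)
      have hlen'' : f'.length + b'.length = front.length + back.length + 1 := by
        simpa using hlen'
      have eA : pvStepA (front ++ back, out) ("*" :: p :: rest2) = (f' ++ b', out) := by
        simp [pvStepA, hg0]
        rw [insertA_eq front back p hinv, hcat]
      have eB : pvStepB (front, back, out) ("*" :: p :: rest2) = (f', b', out) := by
        simp [pvStepB, hg0, hre]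
      rw [eA, eB]
      exact loop_eq cs f' b' out hwf'
        (fun n => by
          have h := hbal (n + 1)
          simp only [List.take_succ_cons, List.countP_cons] at h
          have hm : pvIsM ("*" :: p :: rest2) = false := rfl
          have hq : pvIsP ("*" :: p :: rest2) = true := rfl
          rw [hm, hq] at h
          simp at h
          omega)
        (by have h1 := hinv'; have h2 := hlen''; simp only [List.length_cons] at h1; omega)
    by_cases hmi : a = "-"
    · subst hmi
      have hfb1 : 1 ≤ front.length + back.length := by
        have h1 := hbal 1
        simp only [List.take_succ_cons, List.take_zero, List.countP_cons, List.countP_nil] at h1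
        have hm : pvIsM ("-" :: rest) = true := rfl
        have hq : pvIsP ("-" :: rest) = false := rfl
        rw [hm, hq] at h1
        simp at h1
        omega
      rcases front with _ | ⟨h0, t⟩
      · exfalso; simp only [List.length_nil] at hinv hfb1; omega
      obtain ⟨f', b', hre, hcat, hlen', hinv'⟩ :=
        pvRebal_spec t back (by simp at hinv ⊢; omega) (by simp at hinv ⊢; omega)
      have eA : pvStepA ((h0 :: t) ++ back, out) ("-" :: rest) = (f' ++ b', out ++ [h0]) := by
        simp [pvStepA, hcat]
      have eB : pvStepB (h0 :: t, back, out) ("-" :: rest) = (f', b', out ++ [h0]) := by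
        simp [pvStepB, hre]
      rw [eA, eB]
      exact loop_eq cs f' b' (out ++ [h0]) hwf'
        (fun n => by
          have h := hbal (n + 1)
          simp only [List.take_succ_cons, List.countP_cons] at h
          have hm : pvIsM ("-" :: rest) = true := rfl
          have hq : pvIsP ("-" :: rest) = false := rfl
          rw [hm, hq] at h
          simp at h
          have h2 := hlen'
          omega)
        (by have h1 := hinv'; have h2 := hlen'; omega)
    · have hm : pvIsM (a :: rest) = false := by simp [pvIsM, hmi]
      have hq : pvIsP (a :: rest) = false := by simp [pvIsP, hp, hs]
      have eA : pvStepA (front ++ back, out) (a :: rest) = (front ++ back, out) := by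
        simp [pvStepA, hp, hs, hmi]
      have eB : pvStepB (front, back, out) (a :: rest) = (front, back, out) := by
        simp [pvStepB, hp, hs, hmi]
      rw [eA, eB]
      exact loop_eq cs front back out hwf'
        (fun n => by
          have h := hbal (n + 1)
          simp only [List.take_succ_cons, List.countP_cons] at h
          rw [hm, hq] at h
          simp at h
          omega)
        hinv

-- ===== VERDICT (by name: the statement is the Claim_ definition above) =====
theorem process_queue_spec : Claim_equal_process_queue := by
  intro commands _ hpre
  unfold Spec_process_queue process_queue process_queue_alt
  have hbal : ∀ n : Nat, (commands.take n).countP pvIsM ≤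
      (0 : Nat) + 0 + (commands.take n).countP pvIsP := by
    intro n
    by_cases hn : n ≤ commands.length
    · have := hpre.2 n (by simp [List.mem_range]; omega)
      omega
    · have h1 := hpre.2 commands.length (by simp)
      rw [List.take_length] at h1
      rw [List.take_of_length_le (by omega)]
      omega
  have := loop_eq commands [] [] [] hpre.1 (by simpa using hbal) (by simp)
  simp only [List.nil_append] at this
  rw [this]
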